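-- pv_equiv track=rewrite | github.com/esther-poniatowski/hermeneia | src/hermeneia/rules/math/inline_math.py | _has_binary_minus
-- ===== SOURCE A (Python) =====
-- def _has_binary_minus(text: str) -> bool:
--     for index, char in enumerate(text):
--         if char != "-":
--             continue
--         previous_index = index - 1
--         while previous_index >= 0 and text[previous_index].isspace():
--             previous_index -= 1
--         previous = text[previous_index] if previous_index >= 0 else None
--         if previous is None or previous in {"(", "[", "{", ",", "^", "_"}:
--             continue
--         return True
--     return False
-- ===== SOURCE B (Python) =====
-- def _has_binary_minus(text: str) -> bool:
--     prev_nonspace = None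
--     for char in text:
--         if char == "-":
--             if prev_nonspace is not None and prev_nonspace not in {"(", "[", "{", ",", "^", "_"}:
--                 return True
--         if not char.isspace():
--             prev_nonspace = char
--     return False
-- ===== Notes on version B (the rewrite author's own statement) =====
-- stated objective: simpler
-- what changed: Replaced the per-'-' backward whitespace walk with a single forward pass that carries the most recent non-whitespace character as running state.
import Mathlib
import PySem

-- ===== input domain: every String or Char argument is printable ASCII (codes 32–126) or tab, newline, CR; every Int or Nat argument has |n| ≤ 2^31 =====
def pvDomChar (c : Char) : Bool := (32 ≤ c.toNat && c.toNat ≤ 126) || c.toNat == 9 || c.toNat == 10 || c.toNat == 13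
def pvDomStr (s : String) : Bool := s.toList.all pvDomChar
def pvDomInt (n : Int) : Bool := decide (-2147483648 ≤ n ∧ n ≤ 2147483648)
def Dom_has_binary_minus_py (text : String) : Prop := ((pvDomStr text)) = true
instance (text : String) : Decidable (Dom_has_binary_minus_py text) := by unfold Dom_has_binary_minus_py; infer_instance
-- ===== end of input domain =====

-- B replaces A's backward whitespace walk at each '-' with one forward pass carrying the
-- last non-whitespace character as running state (objective: simpler).

-- ===== PORT A =====
-- the characters after which a '-' is NOT binary (Python's set literal)
def pvOpeners : List Char := ['(', '[', '{', ',', '^', '_']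

-- the 'while previous_index >= 0 and text[previous_index].isspace()' walk followed by the
-- 'previous = text[previous_index] if previous_index >= 0 else None' read; the Nat argument
-- is previous_index + 1 (0 encodes previous_index = -1)
def pvWalkBack (full : List Char) : Nat → Option Char
  | 0 => none
  | n + 1 =>
    let c := full.getD n ' '
    if PySem.Chars.isspace c then pvWalkBack full n else some c

-- 'for index, char in enumerate(text)' with the per-'-' backward walk
def pvLoopA (full : List Char) : List Char → Nat → Bool
  | [], _ => false
  | c :: rest, idx =>
    if c ≠ '-' then pvLoopA full rest (idx + 1)
    else
      match pvWalkBack full idx with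
      | none => pvLoopA full rest (idx + 1)
      | some p => if p ∈ pvOpeners then pvLoopA full rest (idx + 1) else true

def has_binary_minus_py (text : String) : Bool :=
  pvLoopA text.toList text.toList 0

-- ===== PORT B =====
-- one forward pass; prev is the most recent non-whitespace character seen so far
-- 'prev_nonspace is not None and prev_nonspace not in {...}'
def pvPrevOk : Option Char → Bool
  | none => false
  | some p => decide (p ∉ pvOpeners)

def pvLoopB : List Char → Option Char → Bool
  | [], _ => false
  | c :: rest, prev =>
    if c == '-' && pvPrevOk prev then true
    else if PySem.Chars.isspace c then pvLoopB rest prev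
    else pvLoopB rest (some c)

def has_binary_minus_py_alt (text : String) : Bool :=
  pvLoopB text.toList none

-- ===== PRECONDITION & SPEC =====
def Spec_has_binary_minus_py (text : String) (out : Bool) : Prop := out = has_binary_minus_py_alt text
instance (text : String) (out : Bool) : Decidable (Spec_has_binary_minus_py text out) := by unfold Spec_has_binary_minus_py; infer_instance

-- ===== CLAIM (what is proved, stated in full; the proofs are below) =====
def Claim_equal_has_binary_minus_py : Prop := ∀ (text : String), Dom_has_binary_minus_py text → Spec_has_binary_minus_py text (has_binary_minus_py text)

-- ===== LEMMAS AND PROOFS =====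

-- B's state-update function: the last non-whitespace char after processing one more char
def pvUpd (prev : Option Char) (c : Char) : Option Char :=
  if PySem.Chars.isspace c then prev else some c

-- the backward walk never looks at indices ≥ the prefix length
theorem pvWalkBack_append (pre rest : List Char) (n : Nat) (hn : n ≤ pre.length) :
    pvWalkBack (pre ++ rest) n = pvWalkBack pre n := by
  induction n with
  | zero => rfl
  | succ m ih =>
    have hm : m < pre.length := hn
    simp only [pvWalkBack, List.getD_append _ _ _ _ hm, ih (Nat.le_of_lt hm)]

-- the backward walk from the end of a list computes B's carried state
theorem pvWalkBack_eq_fold (pre : List Char) :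
    pvWalkBack pre pre.length = pre.foldl pvUpd none := by
  induction pre using List.reverseRecOn with
  | nil => rfl
  | append_singleton pre c ih =>
    simp only [List.length_append, List.length_singleton, List.foldl_append, List.foldl_cons,
      List.foldl_nil]
    show pvWalkBack (pre ++ [c]) (pre.length + 1) = pvUpd (pre.foldl pvUpd none) c
    simp only [pvWalkBack, pvUpd]
    have hget : (pre ++ [c]).getD pre.length ' ' = c := by
      simp [List.getD]
    rw [hget, pvWalkBack_append pre [c] pre.length (Nat.le_refl _), ih]

-- main invariant: running A's loop on the suffix equals running B's loop with the folded state
theorem pvLoop_eq (cs : List Char) : ∀ pre : List Char,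
    pvLoopA (pre ++ cs) cs pre.length = pvLoopB cs (pre.foldl pvUpd none) := by
  induction cs with
  | nil => intro pre; rfl
  | cons c rest ih =>
    intro pre
    have htail := ih (pre ++ [c])
    simp only [List.append_assoc, List.singleton_append, List.length_append,
      List.length_singleton, List.foldl_append, List.foldl_cons, List.foldl_nil] at htail
    by_cases hc : c = '-'
    · subst hc
      have hwb : pvWalkBack (pre ++ '-' :: rest) pre.length = pre.foldl pvUpd none := by
        rw [pvWalkBack_append pre ('-' :: rest) pre.length (Nat.le_refl _),
          pvWalkBack_eq_fold]
      have hupd : pvUpd (pre.foldl pvUpd none) '-' = some '-' := by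
        simp [pvUpd, show PySem.Chars.isspace '-' = false from by decide]
      rw [hupd] at htail
      simp only [pvLoopA, pvLoopB, hwb, if_neg (by decide : ¬ ('-' : Char) ≠ '-')]
      cases hprev : pre.foldl pvUpd none with
      | none => simpa [pvPrevOk, show PySem.Chars.isspace '-' = false from by decide] using htail
      | some p =>
        by_cases hp : p ∈ pvOpeners
        · simpa [pvPrevOk, hp, show PySem.Chars.isspace '-' = false from by decide] using htail
        · simp [pvPrevOk, hp]
    · have hne : (c == '-') = false := by simp [hc]
      simp only [pvLoopA, pvLoopB, if_pos hc, hne, Bool.false_and, Bool.false_eq_true,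
        if_false]
      by_cases hs : PySem.Chars.isspace c
      · rw [if_pos hs, htail]
        simp [pvUpd, hs]
      · rw [if_neg hs, htail]
        simp [pvUpd, hs]

-- ===== VERDICT (by name: the statement is the Claim_ definition above) =====
theorem has_binary_minus_py_spec : Claim_equal_has_binary_minus_py := by
  intro text _
  unfold Spec_has_binary_minus_py has_binary_minus_py has_binary_minus_py_alt
  simpa using pvLoop_eq text.toList []
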